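-- pv_equiv track=rewrite | github.com/vishkatharki/agentic-context-engine | ace/reflector/recursive.py | _extract_indented_block
-- ===== SOURCE A (Python) =====
-- from typing import Any, Dict, List, Optional, TYPE_CHECKING
--
-- def _extract_indented_block(response: str) -> Optional[str]:
--     """Extract code from indented block (4 spaces or tab).
--
--     Finds contiguous lines that are indented and returns them
--     with indentation removed.
--
--     Args:
--         response: The LLM response text
--
--     Returns:
--         Extracted code or None
--     """
--     lines = response.split("\n")
--     code_lines = []
--     in_code = False
--
--     for line in lines:
--         # Check for 4-space or tab indentation
--         if line.startswith("    ") or line.startswith("\t"):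
--             in_code = True
--             # Remove one level of indentation
--             if line.startswith("    "):
--                 code_lines.append(line[4:])
--             else:
--                 code_lines.append(line[1:])
--         elif in_code:
--             # End of indented block - stop at first non-blank, non-indented line
--             if line.strip():
--                 break
--             # Allow blank lines within code
--             code_lines.append("")
--
--     if code_lines:
--         # Trim trailing blank lines
--         while code_lines and not code_lines[-1].strip():
--             code_lines.pop()
--         return "\n".join(code_lines)
--
--     return None
-- ===== SOURCE B (Python) =====
-- def _dedent_line(l):
--     if l.startswith("    "):
--         return l[4:]
--     if l.startswith("\t"):
--         return l[1:]
--     return ""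
--
--
-- def _extract_indented_block(response):
--     lines = response.split("\n")
--     indented = lambda l: l.startswith("    ") or l.startswith("\t")
--     start = next((i for i, l in enumerate(lines) if indented(l)), None)
--     if start is None:
--         return None
--     rest = lines[start:]
--     end = next((j for j, l in enumerate(rest) if not indented(l) and l.strip()), len(rest))
--     block = [_dedent_line(l) for l in rest[:end]]
--     last = 0
--     for i, l in enumerate(block):
--         if l.strip():
--             last = i + 1
--     return "\n".join(block[:last])
-- ===== Notes on version B (the rewrite author's own statement) =====
-- stated objective: alternative
-- what changed: A's single fused scan with an in_code state flag and a mid-loop break is replaced by a two-phase decomposition: find the start index of the first indented line, find the end index of the first later non-indented non-blank line, then dedent the slice with a helper map and trim trailing blank entries with a forward last-non-blank pass.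
import Mathlib
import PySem

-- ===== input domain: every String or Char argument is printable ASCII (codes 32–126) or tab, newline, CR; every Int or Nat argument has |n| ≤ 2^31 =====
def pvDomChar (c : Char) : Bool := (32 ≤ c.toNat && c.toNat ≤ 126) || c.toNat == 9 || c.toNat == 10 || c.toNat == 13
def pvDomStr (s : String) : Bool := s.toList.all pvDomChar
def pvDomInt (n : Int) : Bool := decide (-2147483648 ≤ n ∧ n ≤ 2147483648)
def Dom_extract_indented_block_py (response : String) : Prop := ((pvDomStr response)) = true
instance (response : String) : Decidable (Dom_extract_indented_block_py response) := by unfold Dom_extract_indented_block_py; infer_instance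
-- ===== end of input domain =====

-- B replaces A's fused state-machine loop (in_code flag + break) by a two-phase
-- find-start / find-end decomposition with a dedent map and a forward trailing-trim;
-- same cost class, objective: alternative decomposition.

-- ===== PORT A =====
-- the 'for line in lines' loop with the in_code flag; a 'break' returns the accumulator
def pvLoopA : List (List Char) → List (List Char) → Bool → List (List Char)
  | [], acc, _ => acc
  | l :: ls, acc, inc =>
    if PySem.Chars.startswith l "    ".toList || PySem.Chars.startswith l "\t".toList then
      if PySem.Chars.startswith l "    ".toList then
        pvLoopA ls (acc ++ [PySem.Chars.slice l (some 4) none]) true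
      else
        pvLoopA ls (acc ++ [PySem.Chars.slice l (some 1) none]) true
    else if inc then
      if PySem.Chars.strip l != [] then acc   -- break
      else pvLoopA ls (acc ++ [[]]) true
    else pvLoopA ls acc inc

-- 'while code_lines and not code_lines[-1].strip(): code_lines.pop()'
def pvTrimA (xs : List (List Char)) : List (List Char) :=
  if h : xs = [] then xs
  else if PySem.Chars.strip (xs.getLast h) != [] then xs
  else pvTrimA xs.dropLast
termination_by xs.length
decreasing_by
  have hx : 0 < xs.length := List.length_pos_of_ne_nil h
  simp only [List.length_dropLast]
  omega

def extract_indented_block_py (response : String) : Option String :=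
  let lines := PySem.Chars.splitOn response.toList "\n".toList
  let code_lines := pvLoopA lines [] false
  if code_lines ≠ [] then some (String.ofList (PySem.Chars.join "\n".toList (pvTrimA code_lines))) else none

-- ===== PORT B =====
def pvIndented (l : List Char) : Bool :=
  PySem.Chars.startswith l "    ".toList || PySem.Chars.startswith l "\t".toList

def pvDedent (l : List Char) : List Char :=
  if PySem.Chars.startswith l "    ".toList then PySem.Chars.slice l (some 4) none
  else if PySem.Chars.startswith l "\t".toList then PySem.Chars.slice l (some 1) none
  else []

def extract_indented_block_py_alt (response : String) : Option String :=
  let lines := PySem.Chars.splitOn response.toList "\n".toList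
  match lines.findIdx? pvIndented with
  | none => none
  | some start =>
    let rest := lines.drop start
    let e := (rest.findIdx? (fun l => !pvIndented l && (PySem.Chars.strip l != []))).getD rest.length
    let block := (rest.take e).map pvDedent
    let last := block.zipIdx.foldl (fun acc p => if PySem.Chars.strip p.1 != [] then p.2 + 1 else acc) 0
    some (String.ofList (PySem.Chars.join "\n".toList (block.take last)))

-- ===== PRECONDITION & SPEC =====
def Spec_extract_indented_block_py (response : String) (out : Option String) : Prop := out = extract_indented_block_py_alt response
instance (response : String) (out : Option String) : Decidable (Spec_extract_indented_block_py response out) := by unfold Spec_extract_indented_block_py; infer_instance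

-- ===== CLAIM (what is proved, stated in full; the proofs are below) =====
def Claim_equal_extract_indented_block_py : Prop := ∀ (response : String), Dom_extract_indented_block_py response → Spec_extract_indented_block_py response (extract_indented_block_py response)

-- ===== LEMMAS AND PROOFS =====

-- continue condition of the block: indented, or blank
def pvK (l : List Char) : Bool := pvIndented l || !(PySem.Chars.strip l != [])

theorem pvLoopA_cons (l : List Char) (ls acc : List (List Char)) (inc : Bool) :
    pvLoopA (l :: ls) acc inc =
      if pvIndented l then
        (if PySem.Chars.startswith l "    ".toList then
          pvLoopA ls (acc ++ [PySem.Chars.slice l (some 4) none]) true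
        else pvLoopA ls (acc ++ [PySem.Chars.slice l (some 1) none]) true)
      else if inc then
        (if PySem.Chars.strip l != [] then acc else pvLoopA ls (acc ++ [[]]) true)
      else pvLoopA ls acc inc := rfl

theorem pvDedent_of_not_indented (l : List Char) (h : pvIndented l = false) : pvDedent l = [] := by
  unfold pvIndented at h
  rw [Bool.or_eq_false_iff] at h
  unfold pvDedent
  rw [if_neg (by rw [h.1]; exact Bool.false_ne_true),
      if_neg (by rw [h.2]; exact Bool.false_ne_true)]

theorem pvDedent_of_indented (l : List Char) (h : pvIndented l = true) :
    pvDedent l = (if PySem.Chars.startswith l "    ".toList then PySem.Chars.slice l (some 4) none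
                  else PySem.Chars.slice l (some 1) none) := by
  unfold pvDedent
  by_cases h4 : PySem.Chars.startswith l "    ".toList = true
  · rw [if_pos h4, if_pos h4]
  · have ht : PySem.Chars.startswith l "\t".toList = true := by
      unfold pvIndented at h
      rw [Bool.or_eq_true] at h
      tauto
    rw [if_neg h4, if_neg h4, if_pos ht]

theorem pvLoopA_true (ls : List (List Char)) (acc : List (List Char)) :
    pvLoopA ls acc true = acc ++ (ls.takeWhile pvK).map pvDedent := by
  induction ls generalizing acc with
  | nil => rw [List.takeWhile_nil, List.map_nil, List.append_nil]; rfl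
  | cons l ls ih =>
    rw [pvLoopA_cons, List.takeWhile_cons]
    by_cases hi : pvIndented l = true
    · have hK : pvK l = true := by unfold pvK; rw [hi, Bool.true_or]
      rw [if_pos hi, if_pos hK, List.map_cons, pvDedent_of_indented l hi]
      by_cases h4 : PySem.Chars.startswith l "    ".toList = true
      · rw [if_pos h4, if_pos h4, ih, List.append_assoc, List.singleton_append]
      · rw [if_neg h4, if_neg h4, ih, List.append_assoc, List.singleton_append]
    · have hi' : pvIndented l = false := Bool.eq_false_iff.mpr hi
      rw [if_neg hi, if_pos rfl]
      by_cases hb : (PySem.Chars.strip l != []) = true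
      · have hK : pvK l = false := by
          unfold pvK; rw [hi', hb, Bool.false_or, Bool.not_true]
        rw [if_pos hb, if_neg (by rw [hK]; exact Bool.false_ne_true),
            List.map_nil, List.append_nil]
      · have hb' : (PySem.Chars.strip l != []) = false := Bool.eq_false_iff.mpr hb
        have hK : pvK l = true := by
          unfold pvK; rw [hi', hb', Bool.false_or, Bool.not_false]
        rw [if_neg hb, if_pos hK, ih, List.map_cons, pvDedent_of_not_indented l hi',
            List.append_assoc, List.singleton_append]

theorem pvLoopA_false (ls : List (List Char)) (acc : List (List Char)) :
    pvLoopA ls acc false =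
      acc ++ ((ls.dropWhile (fun l => !pvIndented l)).takeWhile pvK).map pvDedent := by
  induction ls generalizing acc with
  | nil => rw [List.dropWhile_nil, List.takeWhile_nil, List.map_nil, List.append_nil]; rfl
  | cons l ls ih =>
    rw [pvLoopA_cons, List.dropWhile_cons]
    by_cases hi : pvIndented l = true
    · have hK : pvK l = true := by unfold pvK; rw [hi, Bool.true_or]
      have hni : (!pvIndented l) = false := by rw [hi]; rfl
      rw [if_pos hi, hni, if_neg Bool.false_ne_true,
          List.takeWhile_cons, if_pos hK, List.map_cons, pvDedent_of_indented l hi]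
      by_cases h4 : PySem.Chars.startswith l "    ".toList = true
      · rw [if_pos h4, if_pos h4, pvLoopA_true, List.append_assoc, List.singleton_append]
      · rw [if_neg h4, if_neg h4, pvLoopA_true, List.append_assoc, List.singleton_append]
    · have hi' : pvIndented l = false := Bool.eq_false_iff.mpr hi
      have hni : (!pvIndented l) = true := by rw [hi']; rfl
      rw [if_neg hi, if_neg Bool.false_ne_true, hni, if_pos rfl, ih]

theorem pvFindIdx_drop {a : Type} (p : a → Bool) (l : List a) (i : Nat)
    (h : l.findIdx? p = some i) :
    l.drop i = l.dropWhile (fun x => !p x) ∧ ∃ x xs, l.drop i = x :: xs ∧ p x = true := by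
  induction l generalizing i with
  | nil => rw [List.findIdx?_nil] at h; exact absurd h (by simp)
  | cons a l ih =>
    rw [List.findIdx?_cons] at h
    by_cases ha : p a = true
    · rw [if_pos ha] at h
      have h0 : i = 0 := (Option.some_inj.mp h).symm
      subst h0
      refine ⟨?_, a, l, rfl, ha⟩
      rw [List.dropWhile_cons, if_neg (by rw [ha]; exact (by decide : ¬((!true) = true)))]
      rfl
    · have ha' : p a = false := Bool.eq_false_iff.mpr ha
      rw [if_neg ha] at h
      obtain ⟨j, hj, rfl⟩ := Option.map_eq_some_iff.mp h
      have hih := ih j hj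
      rw [List.dropWhile_cons, if_pos (by rw [ha']; exact (by decide : (!false) = true))]
      exact ⟨hih.1, hih.2⟩

theorem pvFindIdx_take {a : Type} (q : a → Bool) (l : List a) :
    l.take ((l.findIdx? q).getD l.length) = l.takeWhile (fun x => !q x) := by
  induction l with
  | nil => rfl
  | cons a l ih =>
    rw [List.findIdx?_cons, List.takeWhile_cons]
    by_cases ha : q a = true
    · rw [if_pos ha, if_neg (by rw [ha]; exact (by decide : ¬((!true) = true)))]
      rfl
    · have ha' : q a = false := Bool.eq_false_iff.mpr ha
      rw [if_neg ha, if_pos (by rw [ha']; exact (by decide : (!false) = true))]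
      cases hf : l.findIdx? q with
      | none =>
        rw [hf, Option.getD_none] at ih
        rw [Option.map_none, Option.getD_none, List.length_cons, List.take_succ_cons, ih]
      | some j =>
        rw [hf, Option.getD_some] at ih
        rw [Option.map_some, Option.getD_some, List.take_succ_cons, ih]

def pvLast (xs : List (List Char)) : Nat :=
  xs.zipIdx.foldl (fun acc p => if PySem.Chars.strip p.1 != [] then p.2 + 1 else acc) 0

theorem pvLast_concat (xs : List (List Char)) (l : List Char) :
    pvLast (xs ++ [l]) = if PySem.Chars.strip l != [] then xs.length + 1 else pvLast xs := by
  unfold pvLast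
  rw [List.zipIdx_append, List.foldl_append, List.zipIdx_cons, List.zipIdx_nil,
      List.foldl_cons, List.foldl_nil, Nat.zero_add]

theorem pvLast_le (xs : List (List Char)) : pvLast xs ≤ xs.length := by
  induction xs using List.reverseRecOn with
  | nil => exact Nat.le_refl 0
  | append_singleton xs l ih =>
    rw [pvLast_concat, List.length_append, List.length_cons, List.length_nil]
    by_cases hb : (PySem.Chars.strip l != []) = true
    · rw [if_pos hb]
    · rw [if_neg hb]
      omega

theorem pvTrimA_eq_take (xs : List (List Char)) : pvTrimA xs = xs.take (pvLast xs) := by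
  induction xs using List.reverseRecOn with
  | nil => rw [pvTrimA, dif_pos rfl]; rfl
  | append_singleton xs l ih =>
    rw [pvTrimA, pvLast_concat, dif_neg (by simp)]
    simp only [List.getLast_concat]
    by_cases hb : (PySem.Chars.strip l != []) = true
    · rw [if_pos hb, if_pos hb]
      have hlen : xs.length + 1 = (xs ++ [l]).length := by
        rw [List.length_append, List.length_cons, List.length_nil]
      rw [hlen, List.take_length]
    · rw [if_neg hb, if_neg hb, List.dropLast_concat, ih,
          List.take_append_of_le_length (pvLast_le xs)]

-- ===== VERDICT (by name: the statement is the Claim_ definition above) =====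
theorem extract_indented_block_py_spec : Claim_equal_extract_indented_block_py := by
  intro response _
  show extract_indented_block_py response = extract_indented_block_py_alt response
  unfold extract_indented_block_py extract_indented_block_py_alt
  dsimp only
  rw [pvLoopA_false, List.nil_append]
  cases hf : List.findIdx? pvIndented (PySem.Chars.splitOn response.toList "\n".toList) with
  | none =>
    have hall := List.findIdx?_eq_none_iff.mp hf
    have hdw : (PySem.Chars.splitOn response.toList "\n".toList).dropWhile
        (fun l => !pvIndented l) = [] :=
      List.dropWhile_eq_nil_iff.mpr (fun x hx => by rw [hall x hx]; rfl)
    rw [hdw, List.takeWhile_nil, List.map_nil]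
    rw [if_neg (by exact fun hc => hc rfl)]
  | some start =>
    obtain ⟨hdrop, x, xs, hx, hpx⟩ :=
      pvFindIdx_drop pvIndented (PySem.Chars.splitOn response.toList "\n".toList) start hf
    dsimp only
    rw [pvFindIdx_take]
    have hq : (fun y => !((fun l => !pvIndented l && (PySem.Chars.strip l != [])) y)) = pvK := by
      funext y
      simp only [pvK, Bool.not_and, Bool.not_not]
    rw [hq, ← hdrop]
    have hKx : pvK x = true := by unfold pvK; rw [hpx, Bool.true_or]
    have hne : ((((PySem.Chars.splitOn response.toList "\n".toList).drop start).takeWhile pvK).map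
        pvDedent) ≠ [] := by
      rw [hx, List.takeWhile_cons, if_pos hKx, List.map_cons]
      exact List.cons_ne_nil _ _
    rw [if_pos hne, pvTrimA_eq_take]
    rfl
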